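-- pv_equiv track=rewrite | github.com/SonDo580/cli-games | 3-tic_tac_toe/main.py | check_northwest_southeast
-- ===== SOURCE A (Python) =====
-- SIZE = 3
--
-- def check_northwest_southeast(board, mark, row, col):
--     point = 0
--     i = row
--     j = col
--     while i > 0 and j > 0:
--         i -= 1
--         j -= 1
--         if board[i][j] == mark:
--             point += 1
--
--     i = row
--     j = col
--     while i < SIZE - 1 and j < SIZE - 1:
--         i += 1
--         j += 1
--         if board[i][j] == mark:
--             point += 1
--
--     return point + 1
-- ===== SOURCE B (Python) =====
-- SIZE = 3
--
-- def check_northwest_southeast(board, mark, row, col):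
--     up = max(min(row, col), 0)
--     down = max(SIZE - 1 - max(row, col), 0)
--     point = 1
--     for t in range(-up, down + 1):
--         if t and board[row + t][col + t] == mark:
--             point += 1
--     return point
-- ===== Notes on version B (the rewrite author's own statement) =====
-- stated objective: alternative
-- what changed: Replaces A's two directional while-loops (walk up-left, then walk down-right, then +1) by computing both trip counts in closed form (up = max(min(row,col),0), down = max(SIZE-1-max(row,col),0)) and making a single for-loop pass over the offsets -up..down that skips the center cell, starting the count at 1.
import Mathlib
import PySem

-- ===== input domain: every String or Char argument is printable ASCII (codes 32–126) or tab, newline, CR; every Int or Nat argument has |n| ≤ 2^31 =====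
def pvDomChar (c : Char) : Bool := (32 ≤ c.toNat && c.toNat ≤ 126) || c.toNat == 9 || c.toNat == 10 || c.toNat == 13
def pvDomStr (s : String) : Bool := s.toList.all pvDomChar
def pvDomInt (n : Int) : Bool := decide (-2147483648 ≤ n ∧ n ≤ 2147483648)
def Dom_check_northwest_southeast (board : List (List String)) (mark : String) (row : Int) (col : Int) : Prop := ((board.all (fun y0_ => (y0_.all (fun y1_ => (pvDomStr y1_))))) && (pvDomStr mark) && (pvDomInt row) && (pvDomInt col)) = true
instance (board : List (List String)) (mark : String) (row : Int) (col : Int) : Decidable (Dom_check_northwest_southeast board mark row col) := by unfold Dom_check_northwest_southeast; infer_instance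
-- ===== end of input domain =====

-- B replaces A's two directional while-loops by closed-form trip counts (up = max(min(row,col),0),
-- down = max(SIZE-1-max(row,col),0)) and one pass over the offsets -up..down that skips the center.


-- ===== PORT A =====
-- board[i][j] with Python index semantics (negative wrap); none = IndexError (excluded by Pre_)
def pvCell (board : List (List String)) (i j : Int) : Option String :=
  (PySem.List.pyGet? board i).bind (fun r => PySem.List.pyGet? r j)

-- A's first while-loop (i > 0 and j > 0, stepping up-left); fuel i.toNat is exactly enough,
-- the guard is still tested every step, so this equals the Python loop on every input.
def pvLoopUpA (board : List (List String)) (mark : String) : Nat → Int → Int → Int → Int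
  | 0, point, _, _ => point
  | fuel+1, point, i, j =>
    if i > 0 ∧ j > 0 then
      pvLoopUpA board mark fuel
        (if pvCell board (i-1) (j-1) = some mark then point + 1 else point) (i-1) (j-1)
    else point

-- A's second while-loop (i < SIZE-1 and j < SIZE-1, stepping down-right); fuel (2-i).toNat.
def pvLoopDownA (board : List (List String)) (mark : String) : Nat → Int → Int → Int → Int
  | 0, point, _, _ => point
  | fuel+1, point, i, j =>
    if i < 2 ∧ j < 2 then
      pvLoopDownA board mark fuel
        (if pvCell board (i+1) (j+1) = some mark then point + 1 else point) (i+1) (j+1)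
    else point

def check_northwest_southeast (board : List (List String)) (mark : String) (row : Int) (col : Int) : Int :=
  let p1 := pvLoopUpA board mark row.toNat 0 row col
  let p2 := pvLoopDownA board mark (2 - row).toNat p1 row col
  p2 + 1

-- ===== PORT B =====
-- B: for t in range(-up, down+1): if t and board[row+t][col+t] == mark: point += 1
def check_northwest_southeast_alt (board : List (List String)) (mark : String) (row : Int) (col : Int) : Int :=
  let up := max (min row col) 0
  let down := max (3 - 1 - max row col) 0
  (PySem.List.pyRange (-up) (down + 1) 1).foldl
    (fun point t =>
      if t ≠ 0 ∧ pvCell board (row + t) (col + t) = some mark then point + 1 else point) 1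

-- ===== PRECONDITION & SPEC =====
-- true iff board[i][j] would not raise IndexError in Python (negative indices wrap)
def pvCellOK (board : List (List String)) (i j : Int) : Bool :=
  match PySem.List.pyGet? board i with
  | none => false
  | some r => (PySem.List.pyGet? r j).isSome

-- Pre_ excludes exactly the inputs where A raises IndexError: every cell the two walks touch
-- (min(row,col) steps up-left, SIZE-1-max(row,col) steps down-right) must exist. The quantifier
-- ranges are clamped at 2*len(board) only so they evaluate fast: a longer walk visits more
-- consecutive row indices than Python accepts (-len..len-1) and hence always raises, so the
-- clamped condition is extensionally the same.
def Pre_check_northwest_southeast (board : List (List String)) (mark : String) (row : Int) (col : Int) : Prop :=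
  (min row col).toNat ≤ 2 * board.length ∧
  (2 - max row col).toNat ≤ 2 * board.length ∧
  (∀ s ∈ List.range (min (min row col).toNat (2 * board.length)),
      pvCellOK board (row - (s+1)) (col - (s+1)) = true) ∧
  (∀ s ∈ List.range (min (2 - max row col).toNat (2 * board.length)),
      pvCellOK board (row + (s+1)) (col + (s+1)) = true)
instance (board : List (List String)) (mark : String) (row : Int) (col : Int) : Decidable (Pre_check_northwest_southeast board mark row col) := by unfold Pre_check_northwest_southeast; infer_instance

def pvWitness_check_northwest_southeast : List (List String) × String × Int × Int :=
  ([["x","o",""],["o","x",""],["","","x"]], "x", 1, 1)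

def Spec_check_northwest_southeast (board : List (List String)) (mark : String) (row : Int) (col : Int) (out : Int) : Prop := out = check_northwest_southeast_alt board mark row col
instance (board : List (List String)) (mark : String) (row : Int) (col : Int) (out : Int) : Decidable (Spec_check_northwest_southeast board mark row col out) := by unfold Spec_check_northwest_southeast; infer_instance

-- ===== CLAIM (what is proved, stated in full; the proofs are below) =====
def Claim_equal_check_northwest_southeast : Prop := ∀ (board : List (List String)) (mark : String) (row : Int) (col : Int), Dom_check_northwest_southeast board mark row col → Pre_check_northwest_southeast board mark row col → Spec_check_northwest_southeast board mark row col (check_northwest_southeast board mark row col)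

-- ===== LEMMAS AND PROOFS =====
theorem pv_witness_ok :
    Dom_check_northwest_southeast (pvWitness_check_northwest_southeast.1) (pvWitness_check_northwest_southeast.2.1) (pvWitness_check_northwest_southeast.2.2.1) (pvWitness_check_northwest_southeast.2.2.2) ∧
    Pre_check_northwest_southeast (pvWitness_check_northwest_southeast.1) (pvWitness_check_northwest_southeast.2.1) (pvWitness_check_northwest_southeast.2.2.1) (pvWitness_check_northwest_southeast.2.2.2) := by
  decide

-- 0/1 indicator of a matching cell
def pvCnt (board : List (List String)) (mark : String) (i j : Int) : Int :=
  if pvCell board i j = some mark then 1 else 0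

-- indicator used by B's single pass (offset t along the diagonal, center t = 0 skipped)
def pvW (board : List (List String)) (mark : String) (row col t : Int) : Int :=
  if t ≠ 0 ∧ pvCell board (row + t) (col + t) = some mark then 1 else 0

theorem pv_sum_range {M : Type} [AddCommMonoid M] (f : Nat → M) (n : Nat) :
    ((List.range n).map f).sum = ∑ k ∈ Finset.range n, f k := by
  induction n with
  | zero => simp
  | succ n ih => simp [List.range_succ, Finset.sum_range_succ, ih]

theorem pv_sum_split {M : Type} [AddCommMonoid M] (f : Nat → M) (a b : Nat) :
    ∑ k ∈ Finset.range (a + b), f k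
      = (∑ k ∈ Finset.range a, f k) + ∑ k ∈ Finset.range b, f (a + k) := by
  induction b with
  | zero => simp
  | succ b ih =>
      rw [show a + (b+1) = (a+b) + 1 from rfl, Finset.sum_range_succ, ih,
        Finset.sum_range_succ, add_assoc]

theorem pv_upA_sum (board : List (List String)) (mark : String) :
    ∀ (fuel : Nat) (i j p : Int), (min i j).toNat ≤ fuel →
      pvLoopUpA board mark fuel p i j
        = p + ∑ s ∈ Finset.range (min i j).toNat,
            pvCnt board mark (i - ((s : Int)+1)) (j - ((s : Int)+1)) := by
  intro fuel
  induction fuel with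
  | zero =>
      intro i j p h
      have h0 : (min i j).toNat = 0 := by omega
      simp [pvLoopUpA, h0]
  | succ fuel ih =>
      intro i j p h
      by_cases hc : i > 0 ∧ j > 0
      · have hn : (min i j).toNat = (min (i-1) (j-1)).toNat + 1 := by omega
        have hle : (min (i-1) (j-1)).toNat ≤ fuel := by omega
        rw [show pvLoopUpA board mark (fuel+1) p i j
            = pvLoopUpA board mark fuel
                (if pvCell board (i-1) (j-1) = some mark then p + 1 else p) (i-1) (j-1)
            from by simp [pvLoopUpA, hc]]
        rw [ih (i-1) (j-1) _ hle, hn, Finset.sum_range_succ']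
        have harg : ∀ s : Nat,
            pvCnt board mark (i-1 - ((s:Int)+1)) (j-1 - ((s:Int)+1))
              = pvCnt board mark (i - (((s+1 : Nat) : Int)+1)) (j - (((s+1 : Nat) : Int)+1)) := by
          intro s; congr 1 <;> push_cast <;> ring
        rw [Finset.sum_congr rfl (fun s _ => harg s)]
        have hstep : (if pvCell board (i-1) (j-1) = some mark then p + 1 else p)
            = p + pvCnt board mark (i-1) (j-1) := by
          unfold pvCnt; split_ifs <;> ring
        rw [hstep]
        have h0 : pvCnt board mark (i - (((0:Nat):Int)+1)) (j - (((0:Nat):Int)+1))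
            = pvCnt board mark (i-1) (j-1) := by norm_num
        rw [h0]; ring
      · have h0 : (min i j).toNat = 0 := by omega
        simp only [pvLoopUpA, if_neg hc, h0]
        simp

theorem pv_downA_sum (board : List (List String)) (mark : String) :
    ∀ (fuel : Nat) (i j p : Int), (2 - max i j).toNat ≤ fuel →
      pvLoopDownA board mark fuel p i j
        = p + ∑ s ∈ Finset.range (2 - max i j).toNat,
            pvCnt board mark (i + ((s : Int)+1)) (j + ((s : Int)+1)) := by
  intro fuel
  induction fuel with
  | zero =>
      intro i j p h
      have h0 : (2 - max i j).toNat = 0 := by omega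
      simp [pvLoopDownA, h0]
  | succ fuel ih =>
      intro i j p h
      by_cases hc : i < 2 ∧ j < 2
      · have hn : (2 - max i j).toNat = (2 - max (i+1) (j+1)).toNat + 1 := by omega
        have hle : (2 - max (i+1) (j+1)).toNat ≤ fuel := by omega
        rw [show pvLoopDownA board mark (fuel+1) p i j
            = pvLoopDownA board mark fuel
                (if pvCell board (i+1) (j+1) = some mark then p + 1 else p) (i+1) (j+1)
            from by simp [pvLoopDownA, hc]]
        rw [ih (i+1) (j+1) _ hle, hn, Finset.sum_range_succ']
        have harg : ∀ s : Nat,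
            pvCnt board mark (i+1 + ((s:Int)+1)) (j+1 + ((s:Int)+1))
              = pvCnt board mark (i + (((s+1 : Nat) : Int)+1)) (j + (((s+1 : Nat) : Int)+1)) := by
          intro s; congr 1 <;> push_cast <;> ring
        rw [Finset.sum_congr rfl (fun s _ => harg s)]
        have hstep : (if pvCell board (i+1) (j+1) = some mark then p + 1 else p)
            = p + pvCnt board mark (i+1) (j+1) := by
          unfold pvCnt; split_ifs <;> ring
        rw [hstep]
        have h0 : pvCnt board mark (i + (((0:Nat):Int)+1)) (j + (((0:Nat):Int)+1))
            = pvCnt board mark (i+1) (j+1) := by norm_num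
        rw [h0]; ring
      · have h0 : (2 - max i j).toNat = 0 := by omega
        simp only [pvLoopDownA, if_neg hc, h0]
        simp

theorem pv_foldB_sum (board : List (List String)) (mark : String) (row col : Int) :
    ∀ (L : List Int) (p : Int),
      L.foldl (fun point t =>
          if t ≠ 0 ∧ pvCell board (row + t) (col + t) = some mark then point + 1 else point) p
        = p + (L.map (pvW board mark row col)).sum := by
  intro L
  induction L with
  | nil => intro p; simp
  | cons t L ih =>
      intro p
      simp only [List.foldl_cons, List.map_cons, List.sum_cons, ih]
      unfold pvW; split_ifs <;> ring

-- ===== VERDICT (by name: the statement is the Claim_ definition above) =====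
theorem check_northwest_southeast_spec : Claim_equal_check_northwest_southeast := by
  intro board mark row col _ _
  unfold Spec_check_northwest_southeast
  simp only [check_northwest_southeast, check_northwest_southeast_alt]
  rw [pv_upA_sum board mark row.toNat row col 0 (by omega),
      pv_downA_sum board mark (2-row).toNat row col _ (by omega),
      PySem.List.pyRange_one, pv_foldB_sum, List.map_map, pv_sum_range]
  simp only [Function.comp]
  have hn : (max (3 - 1 - max row col) 0 + 1 - -(max (min row col) 0)).toNat
      = (min row col).toNat + (1 + (2 - max row col).toNat) := by omega
  rw [hn, pv_sum_split, Nat.add_comm 1 ((2 - max row col).toNat), Finset.sum_range_succ']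
  have hmid : pvW board mark row col
      (-max (min row col) 0 + (((min row col).toNat + 0 : Nat) : Int)) = 0 := by
    have h0 : -max (min row col) 0 + (((min row col).toNat + 0 : Nat) : Int) = 0 := by omega
    rw [h0]; unfold pvW; simp
  rw [hmid]
  have hup : ∑ k ∈ Finset.range (min row col).toNat,
      pvW board mark row col (-max (min row col) 0 + (k : Int))
      = ∑ s ∈ Finset.range (min row col).toNat,
          pvCnt board mark (row - ((s:Int)+1)) (col - ((s:Int)+1)) := by
    rw [← Finset.sum_range_reflect
      (fun s => pvCnt board mark (row - ((s:Int)+1)) (col - ((s:Int)+1)))]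
    refine Finset.sum_congr rfl (fun k hk => ?_)
    have hk' : k < (min row col).toNat := Finset.mem_range.mp hk
    have htne : (-max (min row col) 0 + (k : Int)) ≠ 0 := by omega
    have e1 : row + (-max (min row col) 0 + (k : Int))
        = row - ((((min row col).toNat - 1 - k : Nat) : Int) + 1) := by omega
    have e2 : col + (-max (min row col) 0 + (k : Int))
        = col - ((((min row col).toNat - 1 - k : Nat) : Int) + 1) := by omega
    unfold pvW pvCnt
    rw [e1, e2]
    simp [htne]
  have hdown : ∑ k ∈ Finset.range (2 - max row col).toNat,
      pvW board mark row col
        (-max (min row col) 0 + (((min row col).toNat + (k + 1) : Nat) : Int))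
      = ∑ s ∈ Finset.range (2 - max row col).toNat,
          pvCnt board mark (row + ((s:Int)+1)) (col + ((s:Int)+1)) := by
    refine Finset.sum_congr rfl (fun k _ => ?_)
    have htne : (-max (min row col) 0 + (((min row col).toNat + (k + 1) : Nat) : Int)) ≠ 0 := by
      omega
    have e1 : row + (-max (min row col) 0 + (((min row col).toNat + (k + 1) : Nat) : Int))
        = row + ((k : Int) + 1) := by omega
    have e2 : col + (-max (min row col) 0 + (((min row col).toNat + (k + 1) : Nat) : Int))
        = col + ((k : Int) + 1) := by omega
    unfold pvW pvCnt
    rw [e1, e2]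
    have hk1 : ¬((k : Int) + 1 = 0) := by omega
    simp [htne, hk1]
  rw [hup, hdown]
  ring
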